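-- pv_equiv track=rewrite | github.com/haoyuhu/haoyuhu.github.io | backend/server.py | find_relevant_articles
-- ===== SOURCE A (Python) =====
-- def find_relevant_articles(query, articles, limit=3):
--     # Simple keyword matching on title and summary
--     scores = []
--     query_lower = query.lower()
--
--     for article in articles:
--         score = 0
--         text = (article.get('title', '') + " " + article.get('summary', '')).lower()
--
--         # Simple scoring
--         words = query_lower.split()
--         for word in words:
--             if word in text:
--                 score += 1
--
--         scores.append((score, article))
--
--     # Sort by score desc
--     scores.sort(key=lambda x: x[0], reverse=True)
--
--     # Return top matches, filter out zero scores if we have enough matches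
--     relevant = [item[1] for item in scores if item[0] > 0]
--
--     if not relevant:
--         # If no keywords match, just return recent ones
--         return articles[:limit]
--
--     return relevant[:limit]
-- ===== SOURCE B (Python) =====
-- def find_relevant_articles(query, articles, limit=3):
--     # Bucket-by-score selection instead of sorting: walk possible scores
--     # from the maximum (number of query words) down to 1 and collect the
--     # articles of each score in original order; fall back to articles[:limit].
--     words = query.lower().split()
--
--     def score(article):
--         text = (article.get('title', '') + " " + article.get('summary', '')).lower()
--         return sum(1 for w in words if w in text)
--
--     scored = [(score(a), a) for a in articles]
--     relevant = [a for s in reversed(range(1, len(words) + 1))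
--                 for (sc, a) in scored if sc == s]
--     if not relevant:
--         return articles[:limit]
--     return relevant[:limit]
-- ===== Notes on version B (the rewrite author's own statement) =====
-- stated objective: faster
-- what changed: B replaces A's stable sort of (score, article) pairs by direct bucket selection: it scores each article once, then walks the possible scores from len(query.split()) down to 1 collecting matching articles in original order, with the same articles[:limit] fallback when nothing matches.
import Mathlib
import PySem

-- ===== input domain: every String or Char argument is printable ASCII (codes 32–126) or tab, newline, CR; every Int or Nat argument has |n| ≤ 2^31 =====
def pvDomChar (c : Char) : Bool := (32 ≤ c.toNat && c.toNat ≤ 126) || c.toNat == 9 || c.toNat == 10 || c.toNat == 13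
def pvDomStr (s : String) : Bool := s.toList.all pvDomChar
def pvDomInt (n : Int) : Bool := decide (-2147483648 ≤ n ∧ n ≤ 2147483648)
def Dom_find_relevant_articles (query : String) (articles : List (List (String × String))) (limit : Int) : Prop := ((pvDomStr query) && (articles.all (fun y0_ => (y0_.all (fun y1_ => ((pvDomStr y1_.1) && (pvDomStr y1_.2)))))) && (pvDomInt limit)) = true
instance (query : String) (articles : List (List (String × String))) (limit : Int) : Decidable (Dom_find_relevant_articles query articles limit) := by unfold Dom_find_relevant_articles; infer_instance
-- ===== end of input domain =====

-- B replaces A's stable sort by direct bucket selection: walk the possible scores from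
-- the maximum (number of query words) down to 1 and collect matching articles in
-- original order (objective: alternative algorithm, no sort).

-- ===== PORT A =====
def find_relevant_articles (query : String) (articles : List (List (String × String))) (limit : Int) : List (List (String × String)) :=
  let query_lower := PySem.Str.lower query
  let scores : List (Int × List (String × String)) := articles.foldl (fun scores article =>
    let text := PySem.Str.lower (PySem.Dict.getD ⟨article⟩ "title" "" ++ " " ++ PySem.Dict.getD ⟨article⟩ "summary" "")
    let words := PySem.Str.split₀ query_lower
    let score := words.foldl (fun score word => if PySem.Str.isIn word text then score + 1 else score) (0 : Int)
    scores ++ [(score, article)]) []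
  let scores := PySem.List.sorted scores (fun x => x.1) true
  let relevant := (scores.filter (fun item => decide (0 < item.1))).map (fun item => item.2)
  if relevant = [] then PySem.List.slice articles none (some limit)
  else PySem.List.slice relevant none (some limit)

-- ===== PORT B =====
-- B's helper score(article): count of query words occurring in the lowered title+summary
def pvScoreB (words : List String) (article : List (String × String)) : Int :=
  let text := PySem.Str.lower (PySem.Dict.getD ⟨article⟩ "title" "" ++ " " ++ PySem.Dict.getD ⟨article⟩ "summary" "")
  ((words.filter (fun w => PySem.Str.isIn w text)).length : Int)

def find_relevant_articles_alt (query : String) (articles : List (List (String × String))) (limit : Int) : List (List (String × String)) :=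
  let words := PySem.Str.split₀ (PySem.Str.lower query)
  let scored := articles.map (fun a => (pvScoreB words a, a))
  let relevant := ((PySem.List.pyRange 1 ((words.length : Int) + 1) 1).reverse).flatMap
    (fun s => (scored.filter (fun x => x.1 == s)).map (fun x => x.2))
  if relevant = [] then PySem.List.slice articles none (some limit)
  else PySem.List.slice relevant none (some limit)

-- ===== PRECONDITION & SPEC =====
def Spec_find_relevant_articles (query : String) (articles : List (List (String × String))) (limit : Int) (out : List (List (String × String))) : Prop := out = find_relevant_articles_alt query articles limit
instance (query : String) (articles : List (List (String × String))) (limit : Int) (out : List (List (String × String))) : Decidable (Spec_find_relevant_articles query articles limit out) := by unfold Spec_find_relevant_articles; infer_instance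

-- ===== CLAIM (what is proved, stated in full; the proofs are below) =====
def Claim_equal_find_relevant_articles : Prop := ∀ (query : String) (articles : List (List (String × String))) (limit : Int), Dom_find_relevant_articles query articles limit → Spec_find_relevant_articles query articles limit (find_relevant_articles query articles limit)

-- ===== LEMMAS AND PROOFS =====

-- [W, W-1, …, 1] — the descending score list B walks
def pvDescP : Nat → List Int
  | 0 => []
  | n+1 => ((n : Int) + 1) :: pvDescP n

-- B's reversed range(1, W+1) is pvDescP W
lemma pvRev_range (n : Nat) : (PySem.List.pyRange 1 ((n : Int) + 1) 1).reverse = pvDescP n := by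
  induction n with
  | zero => simp [pysem, pvDescP]
  | succ m ih =>
      have h1 : ((m : Int) + 1) + 1 = ((m + 1 : Nat) : Int) + 1 := by push_cast; ring
      rw [← h1, PySem.List.pyRange_one_succ_right (by omega)]
      simp [pvDescP, ← ih]

lemma pvDescP_mem {n : Nat} {s : Int} (h : s ∈ pvDescP n) : 1 ≤ s ∧ s ≤ (n : Int) := by
  induction n with
  | zero => simp [pvDescP] at h
  | succ m ih =>
      rcases (by simpa [pvDescP] using h) with h | h
      · omega
      · have := ih h; omega

lemma pvDescP_split (W s₀ : Nat) (h : s₀ ≤ W) :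
    ∃ D₁ D₂, pvDescP W ++ [(0 : Int)] = D₁ ++ (s₀ : Int) :: D₂ ∧
      (∀ s ∈ D₁, (s₀ : Int) < s) ∧ (∀ s ∈ D₂, s < (s₀ : Int)) := by
  induction W with
  | zero =>
      refine ⟨[], [], ?_, by simp, by simp⟩
      have : s₀ = 0 := by omega
      simp [pvDescP, this]
  | succ m ih =>
      by_cases hs : s₀ = m + 1
      · refine ⟨[], pvDescP m ++ [0], by simp [pvDescP, hs], by simp, ?_⟩
        intro s hsmem
        rcases (by simpa using hsmem) with hmem | hmem
        · have := pvDescP_mem hmem; omega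
        · omega
      · obtain ⟨D₁, D₂, heq, h1, h2⟩ := ih (by omega)
        exact ⟨((m : Int) + 1) :: D₁, D₂, by simp [pvDescP, heq], by
          intro s hsmem
          rcases (by simpa using hsmem) with hmem | hmem
          · omega
          · exact h1 s hmem, h2⟩

lemma pvFlatMap_congr {α β : Type} (D : List α) (f g : α → List β) (h : ∀ s ∈ D, f s = g s) :
    D.flatMap f = D.flatMap g := by
  induction D with
  | nil => rfl
  | cons a as ih => simp_all [List.flatMap_cons]

lemma pvInsert_split {α : Type} (bef : α → α → Bool) (x : α) (ys zs : List α)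
    (h : ∀ y ∈ ys, bef x y = false) :
    PySem.List.insertBy bef x (ys ++ zs) = ys ++ PySem.List.insertBy bef x zs := by
  induction ys with
  | nil => rfl
  | cons y ys ih =>
      have hy : bef x y = false := h y (List.mem_cons_self)
      simp only [List.cons_append, PySem.List.insertBy, hy]
      simp [ih (fun z hz => h z (List.mem_cons_of_mem _ hz))]

lemma pvInsert_head {α : Type} (bef : α → α → Bool) (x : α) (zs : List α)
    (h : ∀ y ∈ zs, bef x y = true) :
    PySem.List.insertBy bef x zs = x :: zs := by
  cases zs with
  | nil => rfl
  | cons z zs => simp [PySem.List.insertBy, h z (List.mem_cons_self)]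

-- membership in a bucket concatenation
lemma pvBuckets_mem {α : Type} {l : List (Int × α)} {D : List Int} {y : Int × α}
    (h : y ∈ D.flatMap (fun s => l.filter (fun x => x.1 == s))) : y.1 ∈ D := by
  rcases List.mem_flatMap.mp h with ⟨s, hs, hy⟩
  have := List.of_mem_filter hy
  simpa [show y.1 = s from by simpa using this] using hs

-- inserting one element into the bucket form appends it to its own bucket
lemma pvInsert_buckets {α : Type} (l : List (Int × α)) (W : Nat) (x : Int × α)
    (hx : 0 ≤ x.1 ∧ x.1 ≤ (W : Int)) :
    PySem.List.insertBy (fun a b => decide (b.1 < a.1)) x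
      ((pvDescP W ++ [0]).flatMap (fun s => l.filter (fun z => z.1 == s)))
    = (pvDescP W ++ [0]).flatMap (fun s => (l ++ [x]).filter (fun z => z.1 == s)) := by
  obtain ⟨hx0, hxW⟩ := hx
  obtain ⟨D₁, D₂, heq, h1, h2⟩ := pvDescP_split W x.1.toNat (by omega)
  have hx1 : ((x.1.toNat : Nat) : Int) = x.1 := by omega
  rw [hx1] at heq h1 h2
  rw [heq]
  simp only [List.flatMap_append, List.flatMap_cons]
  -- right-hand side buckets: only the x.1 bucket changes
  have hR1 : D₁.flatMap (fun s => (l ++ [x]).filter (fun z => z.1 == s))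
      = D₁.flatMap (fun s => l.filter (fun z => z.1 == s)) := by
    refine pvFlatMap_congr _ _ _ (fun s hs => ?_)
    have : ¬ (x.1 == s) = true := by simpa using (by have := h1 s hs; omega : x.1 ≠ s)
    simp [List.filter_append, this]
  have hR2 : D₂.flatMap (fun s => (l ++ [x]).filter (fun z => z.1 == s))
      = D₂.flatMap (fun s => l.filter (fun z => z.1 == s)) := by
    refine pvFlatMap_congr _ _ _ (fun s hs => ?_)
    have : ¬ (x.1 == s) = true := by simpa using (by have := h2 s hs; omega : x.1 ≠ s)
    simp [List.filter_append, this]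
  have hRm : (l ++ [x]).filter (fun z => z.1 == x.1)
      = l.filter (fun z => z.1 == x.1) ++ [x] := by
    simp [List.filter_append]
  rw [hR1, hR2, hRm]
  -- left-hand side: x passes D₁ and its own bucket, stops at the head of D₂'s part
  have hsplit : ∀ y ∈ D₁.flatMap (fun s => l.filter (fun z => z.1 == s))
      ++ l.filter (fun z => z.1 == x.1), (fun a b => decide (b.1 < a.1)) x y = false := by
    intro y hy
    rcases List.mem_append.mp hy with hy | hy
    · have : y.1 ∈ D₁ := pvBuckets_mem hy
      have := h1 _ this
      simp only [decide_eq_false_iff_not]; omega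
    · have : y.1 = x.1 := by simpa using (List.mem_filter.mp hy).2
      simp only [decide_eq_false_iff_not]; omega
  have hhead : ∀ y ∈ D₂.flatMap (fun s => l.filter (fun z => z.1 == s)),
      (fun a b => decide (b.1 < a.1)) x y = true := by
    intro y hy
    have : y.1 ∈ D₂ := pvBuckets_mem hy
    have := h2 _ this
    simp only [decide_eq_true_eq]; omega
  calc PySem.List.insertBy (fun a b => decide (b.1 < a.1)) x
        (D₁.flatMap (fun s => l.filter (fun z => z.1 == s)) ++
          (l.filter (fun z => z.1 == x.1) ++ D₂.flatMap (fun s => l.filter (fun z => z.1 == s))))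
      = (D₁.flatMap (fun s => l.filter (fun z => z.1 == s)) ++ l.filter (fun z => z.1 == x.1)) ++
          PySem.List.insertBy (fun a b => decide (b.1 < a.1)) x
            (D₂.flatMap (fun s => l.filter (fun z => z.1 == s))) := by
        rw [← List.append_assoc]
        exact pvInsert_split _ _ _ _ hsplit
    _ = _ := by rw [pvInsert_head _ _ _ hhead]; simp

lemma pvFoldl_buckets {α : Type} (l p : List (Int × α)) (W : Nat)
    (hl : ∀ x ∈ l, 0 ≤ x.1 ∧ x.1 ≤ (W : Int)) :
    l.foldl (fun acc x => PySem.List.insertBy (fun a b => decide (b.1 < a.1)) x acc)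
      ((pvDescP W ++ [0]).flatMap (fun s => p.filter (fun z => z.1 == s)))
    = (pvDescP W ++ [0]).flatMap (fun s => (p ++ l).filter (fun z => z.1 == s)) := by
  induction l generalizing p with
  | nil => simp
  | cons x l ih =>
      rw [List.foldl_cons, pvInsert_buckets p W x (hl x List.mem_cons_self),
        ih (p ++ [x]) (fun z hz => hl z (List.mem_cons_of_mem _ hz))]
      simp

-- the stable reverse sort by score is the bucket concatenation over [W, …, 1, 0]
lemma pvSorted_buckets {α : Type} (l : List (Int × α)) (W : Nat)
    (hl : ∀ x ∈ l, 0 ≤ x.1 ∧ x.1 ≤ (W : Int)) :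
    PySem.List.sorted l (fun x => x.1) true
    = (pvDescP W ++ [0]).flatMap (fun s => l.filter (fun z => z.1 == s)) := by
  rw [PySem.List.sorted_rev_eq_foldl_insertBy]
  have hnil : (pvDescP W ++ [0]).flatMap (fun s => ([] : List (Int × α)).filter (fun (z : Int × α) => z.1 == s)) = [] := by
    exact List.flatMap_eq_nil_iff.mpr (by simp)
  have h := pvFoldl_buckets l [] W hl
  rw [hnil] at h
  simpa using h

-- filtering the positive scores drops exactly the 0 bucket
lemma pvMain {α : Type} (l : List (Int × α)) (W : Nat)
    (hl : ∀ x ∈ l, 0 ≤ x.1 ∧ x.1 ≤ (W : Int)) :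
    ((PySem.List.sorted l (fun x => x.1) true).filter (fun x => decide (0 < x.1))).map (fun x => x.2)
    = (pvDescP W).flatMap (fun s => (l.filter (fun z => z.1 == s)).map (fun x => x.2)) := by
  rw [pvSorted_buckets l W hl]
  rw [List.filter_flatMap]
  simp only [List.flatMap_append, List.flatMap_cons, List.flatMap_nil]
  have h0 : (l.filter (fun z => z.1 == (0 : Int))).filter (fun x => decide (0 < x.1)) = [] := by
    rw [List.filter_filter]
    refine List.filter_eq_nil_iff.mpr (fun z _ => ?_)
    simp only [Bool.and_eq_true, decide_eq_true_eq, beq_iff_eq, not_and]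
    intro h; omega
  have hk : (pvDescP W).flatMap (fun s => (l.filter (fun z => z.1 == s)).filter (fun x => decide (0 < x.1)))
      = (pvDescP W).flatMap (fun s => l.filter (fun z => z.1 == s)) := by
    refine pvFlatMap_congr _ _ _ (fun s hs => ?_)
    refine List.filter_eq_self.mpr (fun z hz => ?_)
    have hz1 : z.1 = s := by simpa using List.of_mem_filter hz
    have := pvDescP_mem hs
    simp only [decide_eq_true_eq]; omega
  rw [h0, hk]
  simp [List.map_flatMap]

-- ===== VERDICT (by name: the statement is the Claim_ definition above) =====
theorem find_relevant_articles_spec : Claim_equal_find_relevant_articles := by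
  intro query articles limit _
  unfold Spec_find_relevant_articles find_relevant_articles find_relevant_articles_alt
  simp only []
  set words := PySem.Str.split₀ (PySem.Str.lower query) with hwords
  -- A's loop builds the same scored list as B's map
  have hfold : articles.foldl (fun scores article =>
      let text := PySem.Str.lower (PySem.Dict.getD ⟨article⟩ "title" "" ++ " " ++ PySem.Dict.getD ⟨article⟩ "summary" "")
      let words := PySem.Str.split₀ (PySem.Str.lower query)
      let score := words.foldl (fun score word => if PySem.Str.isIn word text then score + 1 else score) (0 : Int)
      scores ++ [(score, article)]) []
      = articles.map (fun a => (pvScoreB words a, a)) := by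
    have := PySem.List.foldl_append_singleton_eq_map
      (fun article => (pvScoreB words article, article)) articles []
    rw [show (fun (scores : List (Int × List (String × String))) article =>
        let text := PySem.Str.lower (PySem.Dict.getD ⟨article⟩ "title" "" ++ " " ++ PySem.Dict.getD ⟨article⟩ "summary" "")
        let words := PySem.Str.split₀ (PySem.Str.lower query)
        let score := words.foldl (fun score word => if PySem.Str.isIn word text then score + 1 else score) (0 : Int)
        scores ++ [(score, article)])
      = (fun scores article => scores ++ [(pvScoreB words article, article)]) from ?_]
    · simpa using this
    · funext scores article
      simp only [pvScoreB, PySem.List.foldl_count_if, List.countP_eq_length_filter]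
      simp [hwords]
  rw [hfold, pvRev_range words.length]
  have hl : ∀ x ∈ articles.map (fun a => (pvScoreB words a, a)),
      0 ≤ x.1 ∧ x.1 ≤ (words.length : Int) := by
    intro x hx
    rcases List.mem_map.mp hx with ⟨a, _, rfl⟩
    simp only [pvScoreB]
    constructor
    · positivity
    · exact_mod_cast Int.ofNat_le.mpr (List.length_filter_le _ _)
  rw [pvMain (articles.map (fun a => (pvScoreB words a, a))) words.length hl]
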